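-- pv_equiv track=rewrite | github.com/mtriebes1/CPSC_315_Semester_Project | mysklearn/myutils.py | get_categorical_frequencies
-- ===== SOURCE A (Python) =====
-- def get_categorical_frequencies(column):
--     """
--         Gets the categorical frequencies of the values in a list
--
--         Args:
--             column (list): the column with the categorical data
--
--         Returns:
--             values: the unique categorical values in the column
--             counts: the counts of the corresponing categorical values in the column
--     """
--     values, counts = [], []
--
--     for value in column:
--         if value not in values:
--             # haven't seen this value before
--             values.append(value)
--             counts.append(1)
--         else:
--             # Get the index of the occurance
--             index = values.index(value)
--             counts[index] += 1
--
--     return values, counts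
-- ===== SOURCE B (Python) =====
-- def get_categorical_frequencies(column):
--     """
--         Gets the categorical frequencies of the values in a list.
--
--         Two staged passes: first discover the unique values in first-seen
--         order, then count each of them over the whole column with list.count.
--         List membership (not hashing) is kept so behaviour matches on any input.
--     """
--     values = []
--     for value in column:
--         if value not in values:
--             values.append(value)
--     counts = [column.count(value) for value in values]
--     return values, counts
-- ===== Notes on version B (the rewrite author's own statement) =====
-- stated objective: alternative
-- what changed: Separates A's single interleaved pass (which maintains counts in lockstep, incrementing counts[values.index(value)]) into two staged passes: a discovery loop building only the unique-values list, then a distinct counting pass computing column.count(value) for each unique value; no counts state is threaded through the loop.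
import Mathlib
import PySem

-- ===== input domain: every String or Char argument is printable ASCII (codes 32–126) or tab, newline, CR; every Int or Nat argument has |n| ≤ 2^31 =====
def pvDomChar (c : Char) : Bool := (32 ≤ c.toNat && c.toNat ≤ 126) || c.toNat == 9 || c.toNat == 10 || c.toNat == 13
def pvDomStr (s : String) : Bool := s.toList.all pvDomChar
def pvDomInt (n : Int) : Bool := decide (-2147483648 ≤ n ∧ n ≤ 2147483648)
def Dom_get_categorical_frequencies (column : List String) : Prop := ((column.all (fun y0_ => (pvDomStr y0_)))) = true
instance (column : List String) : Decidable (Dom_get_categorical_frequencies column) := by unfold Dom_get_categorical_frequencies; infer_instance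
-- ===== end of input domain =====

-- B splits A's single interleaved pass into two staged passes: discover the unique values first, then count each with column.count; equal return values are proved.

-- ===== PORT A =====
-- one loop step of A: append a fresh value with count 1, or increment counts[values.index(value)]
def pvStepA (st : List String × List Int) (value : String) : List String × List Int :=
  if value ∉ st.1 then
    (st.1 ++ [value], st.2 ++ [1])
  else
    match PySem.List.index? st.1 value with
    | some index =>
        (st.1, PySem.List.pySetD st.2 (index : Int)
                 (PySem.List.pyGetD st.2 (index : Int) 0 + 1))
    | none => (st.1, st.2)  -- unreachable: value ∈ st.1

def get_categorical_frequencies (column : List String) : List String × List Int :=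
  column.foldl pvStepA ([], [])

-- ===== PORT B =====
def get_categorical_frequencies_alt (column : List String) : List String × List Int :=
  let values := column.foldl
    (fun values value => if value ∉ values then values ++ [value] else values) []
  (values, values.map (fun value => PySem.List.count column value))

-- ===== PRECONDITION & SPEC =====
def Spec_get_categorical_frequencies (column : List String) (out : List String × List Int) : Prop := out = get_categorical_frequencies_alt column
instance (column : List String) (out : List String × List Int) : Decidable (Spec_get_categorical_frequencies column out) := by unfold Spec_get_categorical_frequencies; infer_instance

-- ===== CLAIM (what is proved, stated in full; the proofs are below) =====
def Claim_equal_get_categorical_frequencies : Prop := ∀ (column : List String), Dom_get_categorical_frequencies column → Spec_get_categorical_frequencies column (get_categorical_frequencies column)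

-- ===== LEMMAS AND PROOFS =====

-- B's discovery step, named for the proofs
def pvAdd (values : List String) (value : String) : List String :=
  if value ∉ values then values ++ [value] else values

lemma pvNodupSnoc (vs : List String) (v : String) (h : vs.Nodup) (hv : v ∉ vs) :
    (vs ++ [v]).Nodup := by
  simp [List.nodup_append, h]
  exact fun a ha he => hv (he ▸ ha)

lemma index?_of_mem (vs : List String) (v : String) (h : v ∈ vs) :
    PySem.List.index? vs v = some (vs.idxOf v) := by
  rw [PySem.List.index?_eq_idxOf?]
  induction vs with
  | nil => cases h
  | cons a t ih =>
      by_cases hav : a = v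
      · subst hav; simp [List.idxOf?_cons]
      · have hb : (a == v) = false := by simp [hav]
        rcases List.mem_cons.mp h with h' | h'
        · exact absurd h'.symm hav
        · simp [List.idxOf?_cons, List.idxOf_cons, hb, ih h']

lemma set_map_idxOf (vs : List String) (c : String → Int) (x : Int) (v : String)
    (hnd : vs.Nodup) (hm : v ∈ vs) :
    (vs.map c).set (vs.idxOf v) x = vs.map (fun w => if w = v then x else c w) := by
  induction vs with
  | nil => cases hm
  | cons a t ih =>
      by_cases hav : a = v
      · subst hav
        simp only [List.idxOf_cons_self, List.map_cons, List.set_cons_zero]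
        have hat : a ∉ t := (List.nodup_cons.mp hnd).1
        have ht : t.map c = t.map (fun w => if w = a then x else c w) := by
          apply List.map_congr_left
          intro w hw
          have : w ≠ a := fun he => hat (he ▸ hw)
          simp [this]
        rw [ht]
        simp
      · have hvt : v ∈ t := by
          rcases List.mem_cons.mp hm with h' | h'
          · exact absurd h'.symm hav
          · exact h'
        have hb : (a == v) = false := by simp [hav]
        rw [List.idxOf_cons, hb]
        simp only [cond_false, List.map_cons, List.set_cons_succ]
        rw [ih (List.nodup_cons.mp hnd).2 hvt]
        simp [hav]

lemma getD_map_idxOf (vs : List String) (c : String → Int) (v : String) (hm : v ∈ vs) :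
    PySem.List.pyGetD (vs.map c) ((vs.idxOf v : Nat) : Int) 0 = c v := by
  have hlt : vs.idxOf v < vs.length := List.idxOf_lt_length_of_mem hm
  rw [PySem.List.pyGetD_natCast]
  rw [List.getD_eq_getElem _ _ (by simpa using hlt), List.getElem_map]
  congr 1
  exact List.getElem_idxOf hlt

-- main invariant: A's fold from a well-formed state equals B's discovery fold paired with per-value counts
lemma pvInvariant (rest : List String) : ∀ (vs : List String) (c : String → Int), vs.Nodup →
    List.foldl pvStepA (vs, vs.map c) rest =
      (List.foldl pvAdd vs rest,
       (List.foldl pvAdd vs rest).map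
         (fun w => (if w ∈ vs then c w else 0) + (rest.count w : Int))) := by
  induction rest with
  | nil =>
      intro vs c hnd
      simp only [List.foldl_nil, List.count_nil]
      congr 1
      apply List.map_congr_left
      intro w hw
      simp [hw]
  | cons v rest' ih =>
      intro vs c hnd
      by_cases hv : v ∈ vs
      · have hstep : pvStepA (vs, vs.map c) v =
            (vs, vs.map (fun w => if w = v then c v + 1 else c w)) := by
          unfold pvStepA
          rw [if_neg (by simpa using hv), index?_of_mem vs v hv]
          simp only
          rw [getD_map_idxOf vs c v hv, PySem.List.pySetD_natCast,
            set_map_idxOf vs c (c v + 1) v hnd hv]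
        have hadd : pvAdd vs v = vs := by unfold pvAdd; simp [hv]
        simp only [List.foldl_cons, hstep, hadd,
          ih vs (fun w => if w = v then c v + 1 else c w) hnd]
        congr 1
        apply List.map_congr_left
        intro w _
        by_cases hw : w = v
        · subst hw; simp [hv]; ring
        · simp [hw, Ne.symm hw]
      · have hstep : pvStepA (vs, vs.map c) v =
            (vs ++ [v], (vs ++ [v]).map (fun w => if w = v then 1 else c w)) := by
          unfold pvStepA
          rw [if_pos (by simpa using hv)]
          show (vs ++ [v], List.map c vs ++ [1]) = _
          rw [List.map_append]
          have h1 : List.map c vs = List.map (fun w => if w = v then 1 else c w) vs := by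
            apply List.map_congr_left
            intro w hw
            have : w ≠ v := fun he => hv (he ▸ hw)
            simp [this]
          rw [← h1]
          simp
        have hadd : pvAdd vs v = vs ++ [v] := by unfold pvAdd; simp [hv]
        simp only [List.foldl_cons, hstep, hadd,
          ih (vs ++ [v]) (fun w => if w = v then 1 else c w) (pvNodupSnoc vs v hnd hv)]
        congr 1
        apply List.map_congr_left
        intro w _
        by_cases hw : w = v
        · subst hw; simp [hv]; ring
        · simp [hw, Ne.symm hw]

-- ===== VERDICT (by name: the statement is the Claim_ definition above) =====
theorem get_categorical_frequencies_spec : Claim_equal_get_categorical_frequencies := by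
  intro column _
  unfold Spec_get_categorical_frequencies get_categorical_frequencies get_categorical_frequencies_alt
  have h := pvInvariant column [] (fun _ => 0) List.nodup_nil
  simp only [List.map_nil] at h
  rw [h]
  have hfold : List.foldl pvAdd [] column =
      List.foldl (fun values value => if value ∉ values then values ++ [value] else values)
        ([] : List String) column := by
    unfold pvAdd; rfl
  rw [hfold]
  congr 1
  apply List.map_congr_left
  intro w _
  rw [PySem.List.count_eq]
  simp
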